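-- pv_equiv track=rewrite | github.com/ClaraPlateiro/Lights_Out | experimentos_stats.py | construir_A_bitfilas
-- ===== SOURCE A (Python) =====
-- from typing import List
--
-- def vecinos_cruz(i, j, n):
--     for di, dj in ((0,0),(1,0),(-1,0),(0,1),(0,-1)):
--         r, c = i+di, j+dj
--         if 0 <= r < n and 0 <= c < n:
--             yield r, c
--
-- def a_idx(i, j, n):
--     return i*n + j
--
-- def construir_A_bitfilas(n: int) -> List[int]:
--     """Devuelve A como lista de filas en bitset (int) de tamaño n^2."""
--     tam = n*n
--     A = [0]*tam
--     for i in range(n):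
--         for j in range(n):
--             fila = a_idx(i, j, n)
--             bits = 0
--             for r in range(n):
--                 for c in range(n):
--                     if (i, j) in vecinos_cruz(r, c, n):
--                         bits |= (1 << a_idx(r, c, n))
--             A[fila] = bits
--     return A
-- ===== SOURCE B (Python) =====
-- def construir_A_bitfilas(n: int) -> list:
--     """Devuelve A como lista de filas en bitset (int) de tamaño n^2."""
--     tam = n * n
--     A = [0] * tam
--     for i in range(n):
--         for j in range(n):
--             k = i * n + j
--             bits = 0
--             if i > 0:
--                 bits |= 1 << (k - n)   # celda de arriba
--             if j > 0:
--                 bits |= 1 << (k - 1)   # celda de la izquierda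
--             bits |= 1 << k             # la propia celda
--             if j < n - 1:
--                 bits |= 1 << (k + 1)   # celda de la derecha
--             if i < n - 1:
--                 bits |= 1 << (k + n)   # celda de abajo
--             A[k] = bits
--     return A
-- ===== Notes on version B (the rewrite author's own statement) =====
-- stated objective: faster
-- what changed: Instead of scanning all n^2 cells (r,c) per row and testing membership in the generated cross-neighbour list, B or-s in each cell's own bit and its up-to-four cross-neighbour bits directly by index arithmetic, exploiting the symmetry of the neighbour relation.
import Mathlib
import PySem

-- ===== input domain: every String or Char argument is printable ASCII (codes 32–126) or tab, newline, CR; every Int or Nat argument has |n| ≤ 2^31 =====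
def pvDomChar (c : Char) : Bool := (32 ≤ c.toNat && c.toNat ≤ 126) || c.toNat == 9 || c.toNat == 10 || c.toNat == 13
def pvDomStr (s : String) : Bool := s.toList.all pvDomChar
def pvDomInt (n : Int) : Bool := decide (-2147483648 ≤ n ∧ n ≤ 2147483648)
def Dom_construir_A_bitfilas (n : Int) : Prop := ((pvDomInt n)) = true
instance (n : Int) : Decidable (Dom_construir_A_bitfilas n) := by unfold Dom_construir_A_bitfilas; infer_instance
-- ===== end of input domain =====

-- B replaces A's per-row scan of all n^2 cells (with a membership test in the generated
-- cross-neighbour list) by or-ing each cell's own bit and its up-to-four cross-neighbour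
-- bits directly (faster).

-- ===== PORT A =====
def vecinos_cruz (i j n : Int) : List (Int × Int) :=
  ([((0:Int),(0:Int)),(1,0),(-1,0),(0,1),(0,-1)]).foldl (fun acc dd =>
    let r := i + dd.1
    let c := j + dd.2
    if 0 ≤ r ∧ r < n ∧ 0 ≤ c ∧ c < n then acc ++ [(r, c)] else acc) []

def a_idx (i j n : Int) : Int := i * n + j

def construir_A_bitfilas (n : Int) : List Int :=
  let tam := n * n
  let A : List Int := List.replicate tam.toNat 0
  (PySem.List.pyRange 0 n 1).foldl (fun A i =>
    (PySem.List.pyRange 0 n 1).foldl (fun A j =>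
      let fila := a_idx i j n
      let bits : Int :=
        (PySem.List.pyRange 0 n 1).foldl (fun bits r =>
          (PySem.List.pyRange 0 n 1).foldl (fun bits c =>
            if (i, j) ∈ vecinos_cruz r c n then
              PySem.Int.bor bits (1 <<< (a_idx r c n).toNat)
            else bits) bits) 0
      A.set fila.toNat bits) A) A

-- ===== PORT B =====
def construir_A_bitfilas_alt (n : Int) : List Int :=
  let tam := n * n
  let A : List Int := List.replicate tam.toNat 0
  (PySem.List.pyRange 0 n 1).foldl (fun A i =>
    (PySem.List.pyRange 0 n 1).foldl (fun A j =>
      let k := i * n + j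
      let bits : Int := 0
      let bits := if 0 < i then PySem.Int.bor bits (1 <<< (k - n).toNat) else bits
      let bits := if 0 < j then PySem.Int.bor bits (1 <<< (k - 1).toNat) else bits
      let bits := PySem.Int.bor bits (1 <<< k.toNat)
      let bits := if j < n - 1 then PySem.Int.bor bits (1 <<< (k + 1).toNat) else bits
      let bits := if i < n - 1 then PySem.Int.bor bits (1 <<< (k + n).toNat) else bits
      A.set k.toNat bits) A) A

-- ===== PRECONDITION & SPEC =====
def Spec_construir_A_bitfilas (n : Int) (out : List Int) : Prop := out = construir_A_bitfilas_alt n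
instance (n : Int) (out : List Int) : Decidable (Spec_construir_A_bitfilas n out) := by unfold Spec_construir_A_bitfilas; infer_instance

-- ===== CLAIM (what is proved, stated in full; the proofs are below) =====
def Claim_equal_construir_A_bitfilas : Prop := ∀ (n : Int), Dom_construir_A_bitfilas n → Spec_construir_A_bitfilas n (construir_A_bitfilas n)

-- ===== LEMMAS AND PROOFS =====

-- A's inner c-loop step for a fixed row r (abbreviation used only by the proofs)
def pvStepC (i j n r : Int) (bits c : Int) : Int :=
  if (i, j) ∈ vecinos_cruz r c n then PySem.Int.bor bits (1 <<< (a_idx r c n).toNat) else bits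

-- A's inner r-loop step (the whole c-scan for one row), used only by the proofs
def pvStepR (i j n : Int) (bits r : Int) : Int :=
  (PySem.List.pyRange 0 n 1).foldl (pvStepC i j n r) bits

-- generic: a fold whose step never changes the accumulator is the identity
theorem pv_foldl_id {α β : Type} (l : List α) (g : β → α → β) (b : β)
    (h : ∀ b' x, x ∈ l → g b' x = b') : l.foldl g b = b := by
  induction l generalizing b with
  | nil => rfl
  | cons hd tl ih =>
      simp only [List.foldl_cons, h b hd (by simp)]
      exact ih b (fun b' x hx => h b' x (by simp [hx]))

-- generic: foldl congruence on the members of the list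
theorem pv_foldl_congr {α β : Type} (l : List α) (f g : β → α → β) (b : β)
    (h : ∀ b' x, x ∈ l → f b' x = g b' x) : l.foldl f b = l.foldl g b := by
  induction l generalizing b with
  | nil => rfl
  | cons hd tl ih =>
      simp only [List.foldl_cons, h b hd (by simp)]
      exact ih _ (fun b' x hx => h b' x (by simp [hx]))

-- membership in the cross-neighbour list, arithmetically (for in-range (i,j))
set_option maxHeartbeats 2000000 in
theorem pv_mem_vc {i j n r c : Int} (hi0 : 0 ≤ i) (hin : i < n) (hj0 : 0 ≤ j) (hjn : j < n) :
    ((i, j) ∈ vecinos_cruz r c n) ↔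
      (r = i ∧ c = j) ∨ (r = i - 1 ∧ c = j) ∨ (r = i + 1 ∧ c = j) ∨
      (r = i ∧ c = j - 1) ∨ (r = i ∧ c = j + 1) := by
  simp only [vecinos_cruz, List.foldl_cons, List.foldl_nil]
  split_ifs <;>
    simp only [List.mem_append, List.mem_cons, List.not_mem_nil, List.nil_append,
      Prod.mk.injEq, or_false] <;>
    first | omega | (rw [false_iff]; omega)

-- the c-loop for a row r away from {i-1, i, i+1} leaves bits unchanged
theorem pv_cfold_off {i j n r : Int} (hi0 : 0 ≤ i) (hin : i < n) (hj0 : 0 ≤ j) (hjn : j < n)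
    (hr : r ≠ i - 1 ∧ r ≠ i ∧ r ≠ i + 1) (bits : Int) :
    (PySem.List.pyRange 0 n 1).foldl (pvStepC i j n r) bits = bits := by
  refine pv_foldl_id _ _ _ (fun b c _ => ?_)
  have hnot : ¬ ((i, j) ∈ vecinos_cruz r c n) := by
    rw [pv_mem_vc hi0 hin hj0 hjn]; omega
  simp [pvStepC, hnot]

-- the c-loop for the row above or below i fires exactly at c = j
theorem pv_cfold_col {i j n r : Int} (hi0 : 0 ≤ i) (hin : i < n) (hj0 : 0 ≤ j) (hjn : j < n)
    (hr : r = i - 1 ∨ r = i + 1) (bits : Int) :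
    (PySem.List.pyRange 0 n 1).foldl (pvStepC i j n r) bits
      = PySem.Int.bor bits (1 <<< (a_idx r j n).toNat) := by
  have hsplit : PySem.List.pyRange 0 n 1
      = PySem.List.pyRange 0 j 1 ++ j :: PySem.List.pyRange (j+1) n 1 := by
    rw [PySem.List.pyRange_one_append 0 j n hj0 (le_of_lt hjn), PySem.List.pyRange_one_cons hjn]
  rw [hsplit, List.foldl_append]
  have h1 : (PySem.List.pyRange 0 j 1).foldl (pvStepC i j n r) bits = bits := by
    refine pv_foldl_id _ _ _ (fun b c hc => ?_)
    have hcb := (PySem.List.mem_pyRange_one).1 hc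
    have hnot : ¬ ((i, j) ∈ vecinos_cruz r c n) := by
      rw [pv_mem_vc hi0 hin hj0 hjn]; omega
    simp [pvStepC, hnot]
  rw [h1, List.foldl_cons]
  have hyes : ((i, j) ∈ vecinos_cruz r j n) := by
    rw [pv_mem_vc hi0 hin hj0 hjn]; omega
  have h2 : pvStepC i j n r bits j = PySem.Int.bor bits (1 <<< (a_idx r j n).toNat) := by
    simp [pvStepC, hyes]
  rw [h2]
  refine pv_foldl_id _ _ _ (fun b c hc => ?_)
  have hcb := (PySem.List.mem_pyRange_one).1 hc
  have hnot : ¬ ((i, j) ∈ vecinos_cruz r c n) := by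
    rw [pv_mem_vc hi0 hin hj0 hjn]; omega
  simp [pvStepC, hnot]

-- head part of the c-loop for row i: columns 0..j-1 fire exactly at j-1
theorem pv_mid_head {i j n : Int} (hi0 : 0 ≤ i) (hin : i < n) (hj0 : 0 ≤ j) (hjn : j < n)
    (bits : Int) :
    (PySem.List.pyRange 0 j 1).foldl (pvStepC i j n i) bits
      = if 0 < j then PySem.Int.bor bits (1 <<< (a_idx i (j-1) n).toNat) else bits := by
  by_cases h : 0 < j
  · have e : j - 1 + 1 = j := by omega
    have hsplit : PySem.List.pyRange 0 j 1
        = PySem.List.pyRange 0 (j-1) 1 ++ [j-1] := by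
      have h' := PySem.List.pyRange_one_succ_right (a := 0) (b := j - 1) (by omega)
      rw [e] at h'
      exact h'
    rw [hsplit, List.foldl_append]
    have h1 : (PySem.List.pyRange 0 (j-1) 1).foldl (pvStepC i j n i) bits = bits := by
      refine pv_foldl_id _ _ _ (fun b c hc => ?_)
      have hcb := (PySem.List.mem_pyRange_one).1 hc
      have hnot : ¬ ((i, j) ∈ vecinos_cruz i c n) := by
        rw [pv_mem_vc hi0 hin hj0 hjn]; omega
      simp [pvStepC, hnot]
    rw [h1, if_pos h]
    have hyes : ((i, j) ∈ vecinos_cruz i (j-1) n) := by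
      rw [pv_mem_vc hi0 hin hj0 hjn]; omega
    simp [pvStepC, hyes]
  · have hj : j = 0 := by omega
    rw [if_neg h, hj, PySem.List.pyRange_one_eq_nil (le_refl 0)]
    rfl

-- tail part of the c-loop for row i: columns j+1..n-1 fire exactly at j+1
theorem pv_mid_tail {i j n : Int} (hi0 : 0 ≤ i) (hin : i < n) (hj0 : 0 ≤ j) (hjn : j < n)
    (bits : Int) :
    (PySem.List.pyRange (j+1) n 1).foldl (pvStepC i j n i) bits
      = if j < n - 1 then PySem.Int.bor bits (1 <<< (a_idx i (j+1) n).toNat) else bits := by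
  by_cases h : j < n - 1
  · have hsplit : PySem.List.pyRange (j+1) n 1
        = (j+1) :: PySem.List.pyRange (j+2) n 1 := by
      rw [PySem.List.pyRange_one_cons (by omega)]; norm_num; ring_nf
    rw [hsplit, List.foldl_cons, if_pos h]
    have hyes : ((i, j) ∈ vecinos_cruz i (j+1) n) := by
      rw [pv_mem_vc hi0 hin hj0 hjn]; omega
    have h2 : pvStepC i j n i bits (j+1) = PySem.Int.bor bits (1 <<< (a_idx i (j+1) n).toNat) := by
      simp [pvStepC, hyes]
    rw [h2]
    refine pv_foldl_id _ _ _ (fun b c hc => ?_)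
    have hcb := (PySem.List.mem_pyRange_one).1 hc
    have hnot : ¬ ((i, j) ∈ vecinos_cruz i c n) := by
      rw [pv_mem_vc hi0 hin hj0 hjn]; omega
    simp [pvStepC, hnot]
  · rw [if_neg h, PySem.List.pyRange_one_eq_nil (by omega)]
    rfl

-- the whole c-loop for row i
theorem pv_cfold_mid {i j n : Int} (hi0 : 0 ≤ i) (hin : i < n) (hj0 : 0 ≤ j) (hjn : j < n)
    (bits : Int) :
    (PySem.List.pyRange 0 n 1).foldl (pvStepC i j n i) bits
      = (let b1 := if 0 < j then PySem.Int.bor bits (1 <<< (a_idx i (j-1) n).toNat) else bits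
         let b2 := PySem.Int.bor b1 (1 <<< (a_idx i j n).toNat)
         if j < n - 1 then PySem.Int.bor b2 (1 <<< (a_idx i (j+1) n).toNat) else b2) := by
  have hsplit : PySem.List.pyRange 0 n 1
      = PySem.List.pyRange 0 j 1 ++ j :: PySem.List.pyRange (j+1) n 1 := by
    rw [PySem.List.pyRange_one_append 0 j n hj0 (le_of_lt hjn), PySem.List.pyRange_one_cons hjn]
  rw [hsplit, List.foldl_append, List.foldl_cons,
    pv_mid_head hi0 hin hj0 hjn]
  have hyes : ((i, j) ∈ vecinos_cruz i j n) := by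
    rw [pv_mem_vc hi0 hin hj0 hjn]; omega
  have h2 : ∀ b : Int, pvStepC i j n i b j = PySem.Int.bor b (1 <<< (a_idx i j n).toNat) := by
    intro b; simp [pvStepC, hyes]
  rw [h2, pv_mid_tail hi0 hin hj0 hjn]

-- the full double scan equals B's direct bit chain
theorem pv_inner {i j n : Int} (hi0 : 0 ≤ i) (hin : i < n) (hj0 : 0 ≤ j) (hjn : j < n) :
    (PySem.List.pyRange 0 n 1).foldl (pvStepR i j n) 0
      = (let k := i * n + j
         let bits : Int := 0
         let bits := if 0 < i then PySem.Int.bor bits (1 <<< (k - n).toNat) else bits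
         let bits := if 0 < j then PySem.Int.bor bits (1 <<< (k - 1).toNat) else bits
         let bits := PySem.Int.bor bits (1 <<< k.toNat)
         let bits := if j < n - 1 then PySem.Int.bor bits (1 <<< (k + 1).toNat) else bits
         if i < n - 1 then PySem.Int.bor bits (1 <<< (k + n).toNat) else bits) := by
  have hsplit : PySem.List.pyRange 0 n 1
      = PySem.List.pyRange 0 i 1 ++ i :: PySem.List.pyRange (i+1) n 1 := by
    rw [PySem.List.pyRange_one_append 0 i n hi0 (le_of_lt hin), PySem.List.pyRange_one_cons hin]
  -- head rows 0..i-1 : fire exactly at i-1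
  have hhead : ∀ b : Int, (PySem.List.pyRange 0 i 1).foldl (pvStepR i j n) b
      = if 0 < i then PySem.Int.bor b (1 <<< (a_idx (i-1) j n).toNat) else b := by
    intro b
    by_cases h : 0 < i
    · have e : i - 1 + 1 = i := by omega
      have hs2 : PySem.List.pyRange 0 i 1 = PySem.List.pyRange 0 (i-1) 1 ++ [i-1] := by
        have h' := PySem.List.pyRange_one_succ_right (a := 0) (b := i - 1) (by omega)
        rw [e] at h'
        exact h'
      rw [hs2, List.foldl_append]
      have h1 : (PySem.List.pyRange 0 (i-1) 1).foldl (pvStepR i j n) b = b := by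
        refine pv_foldl_id _ _ _ (fun b' r hr => ?_)
        have hrb := (PySem.List.mem_pyRange_one).1 hr
        exact pv_cfold_off hi0 hin hj0 hjn (by omega) b'
      rw [h1, if_pos h]
      simpa [pvStepR] using pv_cfold_col hi0 hin hj0 hjn (Or.inl rfl) b
    · have hi : i = 0 := by omega
      rw [if_neg h, hi, PySem.List.pyRange_one_eq_nil (le_refl 0)]
      rfl
  -- tail rows i+1..n-1 : fire exactly at i+1
  have htail : ∀ b : Int, (PySem.List.pyRange (i+1) n 1).foldl (pvStepR i j n) b
      = if i < n - 1 then PySem.Int.bor b (1 <<< (a_idx (i+1) j n).toNat) else b := by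
    intro b
    by_cases h : i < n - 1
    · have hs2 : PySem.List.pyRange (i+1) n 1 = (i+1) :: PySem.List.pyRange (i+2) n 1 := by
        rw [PySem.List.pyRange_one_cons (by omega)]; norm_num; ring_nf
      rw [hs2, List.foldl_cons, if_pos h]
      have h2 : pvStepR i j n b (i+1) = PySem.Int.bor b (1 <<< (a_idx (i+1) j n).toNat) :=
        pv_cfold_col hi0 hin hj0 hjn (Or.inr rfl) b
      rw [h2]
      refine pv_foldl_id _ _ _ (fun b' r hr => ?_)
      have hrb := (PySem.List.mem_pyRange_one).1 hr
      exact pv_cfold_off hi0 hin hj0 hjn (by omega) b'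
    · rw [if_neg h, PySem.List.pyRange_one_eq_nil (by omega)]
      rfl
  rw [hsplit, List.foldl_append, List.foldl_cons, hhead]
  have hmid : ∀ b : Int, pvStepR i j n b i
      = (let b1 := if 0 < j then PySem.Int.bor b (1 <<< (a_idx i (j-1) n).toNat) else b
         let b2 := PySem.Int.bor b1 (1 <<< (a_idx i j n).toNat)
         if j < n - 1 then PySem.Int.bor b2 (1 <<< (a_idx i (j+1) n).toNat) else b2) :=
    fun b => pv_cfold_mid hi0 hin hj0 hjn b
  rw [hmid, htail]
  -- align the index arithmetic
  have e1 : a_idx (i-1) j n = i * n + j - n := by simp [a_idx]; ring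
  have e2 : a_idx i (j-1) n = i * n + j - 1 := by simp [a_idx]; ring
  have e3 : a_idx i j n = i * n + j := by simp [a_idx]
  have e4 : a_idx i (j+1) n = i * n + j + 1 := by simp [a_idx]; ring
  have e5 : a_idx (i+1) j n = i * n + j + n := by simp [a_idx]; ring
  simp only [e1, e2, e3, e4, e5]

-- ===== VERDICT (by name: the statement is the Claim_ definition above) =====
theorem construir_A_bitfilas_spec : Claim_equal_construir_A_bitfilas := by
  intro n _
  unfold Spec_construir_A_bitfilas construir_A_bitfilas construir_A_bitfilas_alt
  refine pv_foldl_congr _ _ _ _ (fun A i hi => ?_)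
  have hib := (PySem.List.mem_pyRange_one).1 hi
  refine pv_foldl_congr _ _ _ _ (fun A' j hj => ?_)
  have hjb := (PySem.List.mem_pyRange_one).1 hj
  exact congrArg _ (pv_inner (i := i) (j := j) (n := n) hib.1 hib.2 hjb.1 hjb.2)
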